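-- pv_equiv track=rewrite | github.com/ryan-ph/NeuralEmpty | calculate_predicate_f1.py | count_correct
-- ===== SOURCE A (Python) =====
-- from collections import Counter
--
-- def count_correct(gold, pred, errors):
--     correct = 0
--     counts = Counter()
--     counts.update(gold)
--     for val in pred:
--         if counts[val]:
--             correct += 1
--             counts[val] -= 1
--         else:
--             errors['overpredicted'][val] += 1
--     for val in counts.keys():
--         if counts[val] > 0:
--             errors['underpredicted'][val] += 1
--     return correct
-- ===== SOURCE B (Python) =====
-- from collections import Counter
--
-- def count_correct(gold, pred, errors):
--     # Note: like A, mutates errors in place; return-value = size of multiset intersection.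
--     gold_c = Counter(gold)
--     pred_c = Counter(pred)
--     for v, c in (pred_c - gold_c).items():
--         errors['overpredicted'][v] += c
--     for v in (gold_c - pred_c):
--         errors['underpredicted'][v] += 1
--     return sum((pred_c & gold_c).values())
-- ===== Notes on version B (the rewrite author's own statement) =====
-- stated objective: faster
-- what changed: Replaces A's streaming decrement-and-branch pass over pred with bulk Counter multiset operations: correct = sum((pred_c & gold_c).values()), overpredictions from pred_c - gold_c, underpredictions (+1 each) from the keys of gold_c - pred_c.
import Mathlib
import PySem

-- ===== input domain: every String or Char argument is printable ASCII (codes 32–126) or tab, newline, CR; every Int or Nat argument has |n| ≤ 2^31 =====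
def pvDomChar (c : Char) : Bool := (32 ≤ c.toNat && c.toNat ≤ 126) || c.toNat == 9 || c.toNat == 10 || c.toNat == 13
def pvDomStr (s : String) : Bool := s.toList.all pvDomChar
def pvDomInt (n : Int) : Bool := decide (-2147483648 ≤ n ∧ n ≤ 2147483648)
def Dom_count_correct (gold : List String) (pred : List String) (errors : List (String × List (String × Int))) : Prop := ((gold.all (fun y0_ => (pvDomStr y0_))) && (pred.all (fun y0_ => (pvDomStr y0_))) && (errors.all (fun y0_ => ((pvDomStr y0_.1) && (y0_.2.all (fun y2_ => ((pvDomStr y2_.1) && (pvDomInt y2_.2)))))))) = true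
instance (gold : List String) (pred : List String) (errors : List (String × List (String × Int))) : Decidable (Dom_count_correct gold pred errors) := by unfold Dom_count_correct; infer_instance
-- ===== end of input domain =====

-- B replaces A's streaming decrement-and-branch pass with bulk Counter multiset operations
-- (intersection / differences); equivalence is about the RETURN value — both Pythons also
-- mutate `errors` in place (identically), which the Int-valued ports model but discard.

-- ===== PORT A =====

-- the nested-dict view of the `errors` argument (Python dict-of-dicts; duplicate keys: last wins)
def errDict (errors : List (String × List (String × Int))) : PySem.Dict String (PySem.Dict String Int) :=
  PySem.Dict.ofList (errors.map (fun p => (p.1, PySem.Dict.ofList p.2)))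

-- errors[k][v] += n  (exact inside Pre_, where both keys are present; Python raises KeyError otherwise)
def errAdd (e : PySem.Dict String (PySem.Dict String Int)) (k v : String) (n : Int) :
    PySem.Dict String (PySem.Dict String Int) :=
  e.modify k PySem.Dict.empty (fun inner => inner.modify v 0 (· + n))

-- body of A's `for val in pred:` loop; state = (correct, counts, errors)
def aStep (s : Int × PySem.Dict String Int × PySem.Dict String (PySem.Dict String Int))
    (val : String) : Int × PySem.Dict String Int × PySem.Dict String (PySem.Dict String Int) :=
  if s.2.1.getD val 0 ≠ 0 then
    (s.1 + 1, s.2.1.insert val (s.2.1.getD val 0 - 1), s.2.2)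
  else
    (s.1, s.2.1, errAdd s.2.2 "overpredicted" val 1)

def count_correct (gold : List String) (pred : List String)
    (errors : List (String × List (String × Int))) : Int :=
  -- counts = Counter(); counts.update(gold)
  let counts : PySem.Dict String Int := PySem.Dict.counter gold
  let st := pred.foldl aStep (0, counts, errDict errors)
  -- for val in counts.keys(): if counts[val] > 0: errors['underpredicted'][val] += 1
  let _finalErrs := st.2.1.keys.foldl
    (fun e v => if st.2.1.getD v 0 > 0 then errAdd e "underpredicted" v 1 else e) st.2.2
  st.1

-- ===== PORT B =====
def count_correct_alt (gold : List String) (pred : List String)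
    (errors : List (String × List (String × Int))) : Int :=
  let gold_c := PySem.Dict.counter gold
  let pred_c := PySem.Dict.counter pred
  -- (pred_c - gold_c).items(): positive excesses, in pred_c order
  let excess := pred_c.items.filterMap (fun p =>
    let d := p.2 - gold_c.getD p.1 0
    if 0 < d then some (p.1, d) else none)
  let e1 := excess.foldl (fun e p => errAdd e "overpredicted" p.1 p.2) (errDict errors)
  -- keys of (gold_c - pred_c): each leftover gold value gets exactly +1
  let under := gold_c.items.filterMap (fun p =>
    if 0 < p.2 - pred_c.getD p.1 0 then some p.1 else none)
  let _e2 := under.foldl (fun e v => errAdd e "underpredicted" v 1) e1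
  -- sum((pred_c & gold_c).values())
  let inter := pred_c.items.filterMap (fun p =>
    let m := min p.2 (gold_c.getD p.1 0)
    if 0 < m then some (p.1, m) else none)
  (inter.map (·.2)).sum

-- ===== PRECONDITION & SPEC =====
-- Pre_ excludes exactly the inputs on which the Python raises KeyError: some value is excess-
-- (resp. under-)predicted but 'overpredicted' (resp. 'underpredicted') is missing from the
-- errors dict, or the value is missing from that inner dict, so `+= 1` has no key to read.
def Pre_count_correct (gold : List String) (pred : List String)
    (errors : List (String × List (String × Int))) : Prop :=
  (∀ v ∈ pred, gold.count v < pred.count v →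
      (errDict errors).contains "overpredicted" = true ∧
      ((errDict errors).getD "overpredicted" PySem.Dict.empty).contains v = true) ∧
  (∀ v ∈ gold, pred.count v < gold.count v →
      (errDict errors).contains "underpredicted" = true ∧
      ((errDict errors).getD "underpredicted" PySem.Dict.empty).contains v = true)
instance (gold : List String) (pred : List String) (errors : List (String × List (String × Int))) : Decidable (Pre_count_correct gold pred errors) := by unfold Pre_count_correct; infer_instance

def pvWitness_count_correct : List String × List String × (List (String × List (String × Int))) :=
  (["a", "b", "a"], ["a", "b", "a"], [])

def Spec_count_correct (gold : List String) (pred : List String) (errors : List (String × List (String × Int))) (out : Int) : Prop := out = count_correct_alt gold pred errors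
instance (gold : List String) (pred : List String) (errors : List (String × List (String × Int))) (out : Int) : Decidable (Spec_count_correct gold pred errors out) := by unfold Spec_count_correct; infer_instance

-- ===== CLAIM (what is proved, stated in full; the proofs are below) =====
def Claim_equal_count_correct : Prop := ∀ (gold : List String) (pred : List String) (errors : List (String × List (String × Int))), Dom_count_correct gold pred errors → Pre_count_correct gold pred errors → Spec_count_correct gold pred errors (count_correct gold pred errors)

-- ===== LEMMAS AND PROOFS =====

-- A's streaming loop computes the multiset-intersection size, as a Finset sum
lemma aLoop_fst (pred : List String) :
    ∀ (c0 : Int) (counts : PySem.Dict String Int)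
      (errs : PySem.Dict String (PySem.Dict String Int)),
      (∀ v, 0 ≤ counts.getD v 0) →
      (pred.foldl aStep (c0, counts, errs)).1
        = c0 + ∑ v ∈ pred.toFinset, min (counts.getD v 0) (pred.count v : Int) := by
  induction pred with
  | nil => intro c0 counts errs _; simp
  | cons val rest ih =>
    intro c0 counts errs hnn
    rw [List.foldl_cons]
    have hcnt_self : ((val :: rest).count val : Int) = (rest.count val : Int) + 1 := by
      rw [List.count_cons_self]; push_cast; ring
    have hcnt_ne : ∀ v : String, v ≠ val → ((val :: rest).count v : Int) = (rest.count v : Int) := by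
      intro v hv; simp [Ne.symm hv]
    by_cases h : counts.getD val 0 ≠ 0
    · have hpos : 1 ≤ counts.getD val 0 := by have := hnn val; omega
      have hstep : aStep (c0, counts, errs) val
          = (c0 + 1, counts.insert val (counts.getD val 0 - 1), errs) := by
        simp [aStep, h]
      rw [hstep, ih (c0 + 1) _ errs (by
        intro v
        rw [PySem.Dict.getD_insert]
        split
        · omega
        · exact hnn v)]
      have hcong : ∑ v ∈ rest.toFinset.erase val,
            min ((counts.insert val (counts.getD val 0 - 1)).getD v 0) (rest.count v : Int)
          = ∑ v ∈ rest.toFinset.erase val,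
            min (counts.getD v 0) ((val :: rest).count v : Int) := by
        refine Finset.sum_congr rfl (fun v hv => ?_)
        have hne : v ≠ val := Finset.ne_of_mem_erase hv
        rw [hcnt_ne v hne]
        simp [PySem.Dict.getD_insert, hne]
      rw [List.toFinset_cons,
        ← Finset.add_sum_erase _ _ (Finset.mem_insert_self val rest.toFinset),
        Finset.erase_insert_eq_erase]
      by_cases hm : val ∈ rest.toFinset
      · rw [← Finset.add_sum_erase _ _ hm, hcong, hcnt_self,
          PySem.Dict.getD_insert_self]
        omega
      · rw [Finset.erase_eq_of_notMem hm] at hcong ⊢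
        rw [hcong, hcnt_self]
        have h0 : (rest.count val : Int) = 0 := by
          rw [List.count_eq_zero_of_not_mem (by simpa using hm)]; rfl
        omega
    · rw [not_not] at h
      have hstep : aStep (c0, counts, errs) val
          = (c0, counts, errAdd errs "overpredicted" val 1) := by
        simp [aStep, h]
      rw [hstep, ih c0 counts _ hnn]
      have hcong : ∑ v ∈ rest.toFinset.erase val,
            min (counts.getD v 0) (rest.count v : Int)
          = ∑ v ∈ rest.toFinset.erase val,
            min (counts.getD v 0) ((val :: rest).count v : Int) := by
        refine Finset.sum_congr rfl (fun v hv => ?_)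
        rw [hcnt_ne v (Finset.ne_of_mem_erase hv)]
      rw [List.toFinset_cons,
        ← Finset.add_sum_erase _ _ (Finset.mem_insert_self val rest.toFinset),
        Finset.erase_insert_eq_erase, h]
      have hnv : (0:Int) ≤ ((val :: rest).count val : Int) := Int.natCast_nonneg _
      by_cases hm : val ∈ rest.toFinset
      · rw [← Finset.add_sum_erase _ _ hm, hcong]
        have hnr : (0:Int) ≤ (rest.count val : Int) := Int.natCast_nonneg _
        omega
      · rw [Finset.erase_eq_of_notMem hm] at hcong ⊢
        rw [hcong]
        omega

-- the filterMap-then-sum shape of B's intersection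
lemma sum_filterMap_pos {α : Type} (l : List α) (F : α → Int) :
    ((l.filterMap (fun k => if 0 < F k then some (k, F k) else none)).map (·.2)).sum
      = (l.map (fun k => if 0 < F k then F k else 0)).sum := by
  induction l with
  | nil => rfl
  | cons a t ih =>
    simp only [List.filterMap_cons, List.map_cons, List.sum_cons]
    by_cases h : 0 < F a
    · simp [h, ih]
    · simp [h, ih]

lemma toFinset_ofList (xs : List String) : (PySem.Set.ofList xs).toFinset = xs.toFinset := by
  ext v
  simp [List.mem_toFinset, PySem.Set.mem_ofList]

lemma alt_eq_sum (gold pred : List String) (errors : List (String × List (String × Int))) :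
    count_correct_alt gold pred errors
      = ∑ v ∈ pred.toFinset, min (pred.count v : Int) (gold.count v : Int) := by
  show ((((PySem.Dict.counter pred).items.filterMap (fun p =>
      let m := min p.2 ((PySem.Dict.counter gold).getD p.1 0)
      if 0 < m then some (p.1, m) else none)).map (·.2)).sum) = _
  rw [PySem.Dict.items_counter, List.filterMap_map]
  have hF : ∀ k : String,
      ((fun p : String × Int =>
          let m := min p.2 ((PySem.Dict.counter gold).getD p.1 0)
          if 0 < m then some (p.1, m) else none) ∘
        (fun k => (k, (pred.count k : Int)))) k
        = (fun k : String =>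
            if 0 < min (pred.count k : Int) (gold.count k : Int)
            then some (k, min (pred.count k : Int) (gold.count k : Int)) else none) k := by
    intro k
    simp [Function.comp, PySem.Dict.getD_counter]
  rw [funext hF, sum_filterMap_pos]
  have hc : ∀ k : String,
      (if 0 < min (pred.count k : Int) (gold.count k : Int)
       then min (pred.count k : Int) (gold.count k : Int) else 0)
        = min (pred.count k : Int) (gold.count k : Int) := by
    intro k
    have h1 : (0:Int) ≤ (pred.count k : Int) := Int.natCast_nonneg _
    have h2 : (0:Int) ≤ (gold.count k : Int) := Int.natCast_nonneg _
    omega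
  rw [funext hc, ← List.sum_toFinset _ (PySem.Set.nodup_ofList pred), toFinset_ofList]

theorem ports_agree (gold pred : List String) (errors : List (String × List (String × Int))) :
    count_correct gold pred errors = count_correct_alt gold pred errors := by
  show (pred.foldl aStep (0, PySem.Dict.counter gold, errDict errors)).1 = _
  rw [aLoop_fst pred 0 (PySem.Dict.counter gold) (errDict errors)
      (fun v => by rw [PySem.Dict.getD_counter]; exact Int.natCast_nonneg _),
    alt_eq_sum]
  rw [zero_add]
  exact Finset.sum_congr rfl (fun v _ => by rw [PySem.Dict.getD_counter, min_comm])

-- ===== VERDICT (by name: the statement is the Claim_ definition above) =====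
theorem count_correct_spec : Claim_equal_count_correct := by
  intro gold pred errors _ _
  exact ports_agree gold pred errors
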